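-- pv_equiv track=rewrite | github.com/sirrommit/polynomial | src/polynomial_education/polynomial_old.py | find_repeating_end
-- ===== SOURCE A (Python) =====
-- def find_repeating_end(string, min_repeats=3):
--     """ Find the largest sequence of repeating characters (rep) such that
--     string ends with reprep...rep (with the last occurence possibly cut short)
--
--     Returns (start of first repeat, length of repeat) or (-1, 0) if none found
--     """
--     max_repeat_poss = len(string) // min_repeats
--     length = max_repeat_poss
--     repeat_found = False
--     while not repeat_found and length > 0:
--         pos_repeat = string[-length:]
--         if string[-min_repeats * length:] == pos_repeat * min_repeats:
--             repeat_found = True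
--         else:
--             length -= 1
--     if not repeat_found:
--         return (-1, 0)
--     for start in range(len(string) - min_repeats * length):
--         end_length = len(string) - start
--         repeat = string[start:start + length] * (end_length // length + 1)
--         repeat = repeat[:end_length]
--         if string[start:] == repeat:
--             return (start, length)
--     return (-1, 0) # This line should never run
-- ===== SOURCE B (Python) =====
-- def find_repeating_end(string, min_repeats=3):
--     """Find the largest repeating block the string ends with (the last copy
--     may be cut short): try each candidate block length from largest to
--     smallest, measure how far that period extends backwards from the end in
--     one scan, and read the start position directly off that run length.
--
--     Returns (start of first repeat, length of repeat) or (-1, 0) if none.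
--     """
--     n = len(string)
--     for length in range(n // min_repeats, 0, -1):
--         t = 0
--         while t < n - length and string[n - length - 1 - t] == string[n - 1 - t]:
--             t += 1
--         if t >= (min_repeats - 1) * length:
--             return (n - length - t, length)
--     return (-1, 0)
-- ===== Notes on version B (the rewrite author's own statement) =====
-- stated objective: alternative
-- what changed: B replaces A's two scans (slice-equality search for the repeat length, then a second loop over candidate starts building a truncated repetition string for each) by one backward match-run count per candidate length, from which both the periodicity test and the returned start follow directly, so the start loop and all string building disappear.
-- intended difference: On inputs whose maximal trailing repeat consists of exactly min_repeats copies (it does not extend even one character further back, e.g. the witness string of three abc blocks with min_repeats=3, or any nonempty string with min_repeats=1), A returns (-1, 0) because its start loop range(len-min_repeats*length) excludes the true start and its dead-code fallback line executes, while B returns (start, length) of that repeat, which is the intended value per A's own docstring. — e.g. on find_repeating_end("abcabcabc", 3): A returns (-1, 0), B returns (0, 3)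
import Mathlib
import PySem

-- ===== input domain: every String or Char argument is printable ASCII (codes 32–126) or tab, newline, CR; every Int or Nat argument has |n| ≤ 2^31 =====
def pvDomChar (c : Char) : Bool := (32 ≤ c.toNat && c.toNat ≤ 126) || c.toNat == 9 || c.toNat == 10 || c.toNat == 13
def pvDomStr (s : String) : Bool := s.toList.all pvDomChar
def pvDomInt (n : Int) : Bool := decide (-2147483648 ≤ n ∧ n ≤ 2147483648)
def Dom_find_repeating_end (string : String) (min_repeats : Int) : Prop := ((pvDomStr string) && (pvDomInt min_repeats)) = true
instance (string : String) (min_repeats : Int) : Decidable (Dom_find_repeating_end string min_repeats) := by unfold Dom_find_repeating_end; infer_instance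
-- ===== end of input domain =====

-- B replaces A's two scans by one backward match-run count per candidate length, from which the
-- test and the returned start follow directly (objective: alternative; no mutation). Where the
-- trailing repeat is exactly min_repeats copies, A's start loop misses it and A returns (-1,0);
-- B returns the repeat (intended difference, see D_ below).

-- ===== PORT A =====
-- Python `u * k` on a string (k : Int; k ≤ 0 gives "")
def pyMulChars (u : List Char) (k : Int) : List Char := List.flatten (List.replicate k.toNat u)

-- the test of A's first while-loop at a given length
def aCond1 (s : List Char) (m len : Int) : Bool :=
  PySem.List.slice s (some (-(m * len))) none == pyMulChars (PySem.List.slice s (some (-len)) none) m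

-- A's first while-loop; `length` decreases by 1 each pass and the loop exits at length = 0,
-- so the Int `length` itself serves as fuel (the Nat argument is length, returned as Int)
def aLoop1 (s : List Char) (m : Int) : Nat → Option Int
  | 0 => none
  | f + 1 =>
      if aCond1 s m ((f + 1 : Nat) : Int) then some ((f + 1 : Nat) : Int) else aLoop1 s m f

-- A's for-loop over the materialised range list
def aLoop2 (s : List Char) (n L : Int) : List Int → Int × Int
  | [] => (-1, 0)
  | st :: rest =>
      let endLength := n - st
      let rep := pyMulChars (PySem.List.slice s (some st) (some (st + L))) (PySem.Int.floordiv endLength L + 1)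
      let rep2 := PySem.List.slice rep none (some endLength)
      if PySem.List.slice s (some st) none == rep2 then (st, L) else aLoop2 s n L rest

def find_repeating_end (string : String) (min_repeats : Int) : Int × Int :=
  let s := string.toList
  let n : Int := s.length
  let maxRep := PySem.Int.floordiv n min_repeats
  match aLoop1 s min_repeats maxRep.toNat with
  | none => (-1, 0)
  | some L => aLoop2 s n L (PySem.List.pyRange 0 (n - min_repeats * L) 1)

-- ===== PORT B =====
-- Source B's inner while-loop: count matches s[n-L-1-t] == s[n-1-t]; fuel = (n - L) - t
def bRun (s : List Char) (L : Nat) : Nat → Nat → Nat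
  | 0, t => t
  | f + 1, t =>
      if s.getD (s.length - L - 1 - t) ' ' == s.getD (s.length - 1 - t) ' ' then bRun s L f (t + 1) else t

-- Source B's for-loop over length = n//min_repeats .. 1 (fuel = length; empty when n//min_repeats ≤ 0)
def bLoop (s : List Char) (mm : Nat) : Nat → Int × Int
  | 0 => (-1, 0)
  | l + 1 =>
      let t := bRun s (l + 1) (s.length - (l + 1)) 0
      if (mm - 1) * (l + 1) ≤ t then ((s.length : Int) - (l + 1) - t, ((l + 1 : Nat) : Int))
      else bLoop s mm l

def find_repeating_end_alt (string : String) (min_repeats : Int) : Int × Int :=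
  let s := string.toList
  bLoop s min_repeats.toNat (PySem.Int.floordiv (s.length : Int) min_repeats).toNat

-- ===== PRECONDITION & SPEC =====
-- A raises ZeroDivisionError exactly when min_repeats = 0; it returns on every other input.
def Pre_find_repeating_end (string : String) (min_repeats : Int) : Prop := min_repeats ≠ 0
instance (string : String) (min_repeats : Int) : Decidable (Pre_find_repeating_end string min_repeats) := by
  unfold Pre_find_repeating_end; infer_instance

def pvWitness_find_repeating_end : String × Int := ("xaaaa", 3)

-- On inputs whose maximal trailing repeat is exactly min_repeats copies (it does not extend one
-- character further back), A returns (-1,0) — its start loop excludes the true start and its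
-- dead-code fallback line executes — while B returns (start, length) of that repeat, the
-- intended value per A's own docstring.
def D_find_repeating_end (string : String) (min_repeats : Int) : Prop :=
  let s := string.toList
  let k := min_repeats.toNat
  let F := Nat.findGreatest
    (fun L => s.drop (s.length - k * L + L) <+: s.drop (s.length - k * L)) (s.length / k)
  F ≠ 0 ∧ (s.length = k * F ∨
    ¬ s.drop (s.length - k * F - 1 + F) <+: s.drop (s.length - k * F - 1))
instance (string : String) (min_repeats : Int) : Decidable (D_find_repeating_end string min_repeats) := by
  unfold D_find_repeating_end; infer_instance

def Spec_find_repeating_end (string : String) (min_repeats : Int) (out : Int × Int) : Prop :=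
  ¬ D_find_repeating_end string min_repeats → out = find_repeating_end_alt string min_repeats
instance (string : String) (min_repeats : Int) (out : Int × Int) : Decidable (Spec_find_repeating_end string min_repeats out) := by
  unfold Spec_find_repeating_end; infer_instance

def pvDiffWitness_find_repeating_end : String × Int := ("abcabcabc", 3)
def pvDiffWitnessOut_find_repeating_end : (Int × Int) × (Int × Int) := ((-1, 0), (0, 3))

-- ===== CLAIM (what is proved, stated in full; the proofs are below) =====
def Claim_unchanged_find_repeating_end : Prop := ∀ (string : String) (min_repeats : Int), Dom_find_repeating_end string min_repeats → Pre_find_repeating_end string min_repeats → Spec_find_repeating_end string min_repeats (find_repeating_end string min_repeats)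
def Claim_changed_find_repeating_end : Prop := Dom_find_repeating_end (pvDiffWitness_find_repeating_end.1) (pvDiffWitness_find_repeating_end.2) ∧ Pre_find_repeating_end (pvDiffWitness_find_repeating_end.1) (pvDiffWitness_find_repeating_end.2) ∧ D_find_repeating_end (pvDiffWitness_find_repeating_end.1) (pvDiffWitness_find_repeating_end.2) ∧ find_repeating_end (pvDiffWitness_find_repeating_end.1) (pvDiffWitness_find_repeating_end.2) = pvDiffWitnessOut_find_repeating_end.1 ∧ find_repeating_end_alt (pvDiffWitness_find_repeating_end.1) (pvDiffWitness_find_repeating_end.2) = pvDiffWitnessOut_find_repeating_end.2 ∧ pvDiffWitnessOut_find_repeating_end.1 ≠ pvDiffWitnessOut_find_repeating_end.2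
def Claim_exact_find_repeating_end : Prop := ∀ (string : String) (min_repeats : Int), Dom_find_repeating_end string min_repeats → Pre_find_repeating_end string min_repeats → D_find_repeating_end string min_repeats → find_repeating_end string min_repeats ≠ find_repeating_end_alt string min_repeats

-- ===== LEMMAS AND PROOFS =====

-- "the last k characters of s have period L" (as one list equation)
abbrev SufPer (s : List Char) (L k : Nat) : Prop :=
  s.drop (s.length - k + L) = (s.drop (s.length - k)).take (k - L)

-- pointwise periodicity of the suffix of s starting at a
def Per (s : List Char) (L a : Nat) : Prop :=
  ∀ j, a ≤ j → j + L < s.length → s.getD j ' ' = s.getD (j + L) ' '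

-- pointwise periodicity of a whole list
def PeriodB (w : List Char) (L : Nat) : Prop :=
  ∀ i, i + L < w.length → w.getD i ' ' = w.getD (i + L) ' '

theorem listExtGetD {l l' : List Char} (h : l.length = l'.length)
    (h2 : ∀ i, i < l.length → l.getD i ' ' = l'.getD i ' ') : l = l' := by
  apply List.ext_getElem h
  intro i h1 h1'
  have h3 := h2 i h1
  rwa [List.getD_eq_getElem _ _ h1, List.getD_eq_getElem _ _ h1'] at h3

theorem getD_drop' (s : List Char) (a i : Nat) :
    (s.drop a).getD i ' ' = s.getD (a + i) ' ' := by
  simp [List.getD_eq_getElem?_getD, List.getElem?_drop]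

theorem getD_take_lt (v : List Char) (m i : Nat) (h : i < m) :
    (v.take m).getD i ' ' = v.getD i ' ' := by
  simp [List.getD_eq_getElem?_getD, List.getElem?_take, h]

theorem per_iff_periodB (s : List Char) (L a : Nat) :
    (Per s L a ↔ PeriodB (s.drop a) L) := by
  constructor
  · intro hp i hi
    rw [List.length_drop] at hi
    rw [getD_drop', getD_drop']
    have := hp (a + i) (by omega) (by omega)
    rwa [show a + (i + L) = a + i + L by omega]
  · intro hp j haj hjL
    have := hp (j - a) (by rw [List.length_drop]; omega)
    rw [getD_drop', getD_drop', show a + (j - a) = j by omega,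
      show a + (j - a + L) = j + L by omega] at this
    exact this

-- shift equation ⇔ pointwise periodicity
theorem shift_iff_periodB (w : List Char) (L : Nat) (hL : 1 ≤ L) :
    (w.drop L = w.take (w.length - L)) ↔ PeriodB w L := by
  have getD_take' : ∀ (v : List Char) (m i : Nat), i < m → (v.take m).getD i ' ' = v.getD i ' ' := by
    intro v m i him
    simp [List.getD_eq_getElem?_getD, List.getElem?_take, him]
  constructor
  · intro h i hi
    have h3 := congrArg (fun l => List.getD l i ' ') h
    simp only at h3
    rw [getD_drop', getD_take' _ _ _ (by omega), Nat.add_comm] at h3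
    exact h3.symm
  · intro hp
    apply listExtGetD
    · simp
    · intro i hi
      rw [List.length_drop] at hi
      rw [getD_drop', Nat.add_comm L i, getD_take' _ _ _ (by omega)]
      exact (hp i (by omega)).symm

theorem sufPer_iff (s : List Char) (L k : Nat) (hL : 1 ≤ L) (hLk : L ≤ k) (hk : k ≤ s.length) :
    SufPer s L k ↔ Per s L (s.length - k) := by
  unfold SufPer
  have h1 : s.drop (s.length - k + L) = (s.drop (s.length - k)).drop L := by
    rw [List.drop_drop]
  have h2 : k - L = (s.drop (s.length - k)).length - L := by
    rw [List.length_drop]; omega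
  rw [h1, h2, shift_iff_periodB _ _ hL, per_iff_periodB]

theorem getD_flatten_replicate (u : List Char) (k i : Nat) (hu : 1 ≤ u.length)
    (hi : i < k * u.length) :
    (List.flatten (List.replicate k u)).getD i ' ' = u.getD (i % u.length) ' ' := by
  induction k generalizing i with
  | zero => omega
  | succ k ih =>
    rw [List.replicate_succ, List.flatten_cons]
    by_cases hiu : i < u.length
    · rw [List.getD_append _ _ _ _ hiu, Nat.mod_eq_of_lt hiu]
    · have hle : u.length ≤ i := by omega
      rw [List.getD_append_right _ _ _ _ hle]
      rw [ih (i - u.length) (by rw [Nat.succ_mul] at hi; omega)]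
      rw [Nat.mod_eq_sub_mod hle]

theorem length_flatten_replicate (u : List Char) (k : Nat) :
    (List.flatten (List.replicate k u)).length = k * u.length := by
  induction k with
  | zero => simp
  | succ k ih =>
    rw [List.replicate_succ, List.flatten_cons, List.length_append, ih, Nat.succ_mul]
    omega

theorem periodB_of_flatten (w u : List Char) (k L : Nat) (hL : 1 ≤ L) (hu : u.length = L)
    (h : w = List.flatten (List.replicate k u)) : PeriodB w L := by
  subst h
  subst hu
  intro i hi
  rw [length_flatten_replicate] at hi
  rw [getD_flatten_replicate u k i (by omega) (by omega),
    getD_flatten_replicate u k (i + u.length) (by omega) (by omega), Nat.add_mod_right]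

theorem getD_mod_of_periodB (w : List Char) (L : Nat) (hL : 1 ≤ L) (hp : PeriodB w L) :
    ∀ i, i < w.length → w.getD i ' ' = w.getD (i % L) ' ' := by
  intro i
  induction i using Nat.strong_induction_on with
  | _ i ih =>
    intro hi
    by_cases hiL : i < L
    · rw [Nat.mod_eq_of_lt hiL]
    · have h1 : i - L + L = i := by omega
      have h2 := hp (i - L) (by omega)
      rw [h1] at h2
      rw [← h2, ih (i - L) (by omega) (by omega), ← Nat.mod_eq_sub_mod (show L ≤ i by omega)]

-- the last-block repetition equation (A's first-loop test), from periodicity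
theorem flatten_last_of_periodB (w : List Char) (L mm : Nat) (hL : 1 ≤ L) (hmm : 1 ≤ mm)
    (hlen : w.length = mm * L) (hp : PeriodB w L) :
    w = List.flatten (List.replicate mm (w.drop ((mm - 1) * L))) := by
  have hsub : (mm - 1) * L = mm * L - L := by rw [Nat.sub_mul, one_mul]
  have hLm : L ≤ mm * L := by
    calc L = 1 * L := (one_mul L).symm
    _ ≤ mm * L := Nat.mul_le_mul_right L hmm
  have hulen : (w.drop ((mm - 1) * L)).length = L := by
    rw [List.length_drop, hlen, hsub]; omega
  apply listExtGetD
  · rw [length_flatten_replicate, hulen, hlen]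
  · intro i hi
    rw [hlen] at hi
    rw [getD_flatten_replicate _ _ _ (by omega) (by rw [hulen]; exact hi), hulen]
    rw [getD_drop']
    have hmod : ((mm - 1) * L + i % L) % L = i % L := by
      rw [Nat.add_comm, Nat.add_mul_mod_self_right]
      exact Nat.mod_eq_of_lt (Nat.mod_lt _ (by omega))
    have e1 := getD_mod_of_periodB w L hL hp ((mm - 1) * L + i % L)
      (by rw [hlen, hsub]; have := Nat.mod_lt i (show 0 < L by omega); omega)
    rw [hmod] at e1
    have e2 := getD_mod_of_periodB w L hL hp i (by omega)
    rw [e2, e1]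

-- the truncated-repetition equation (A's second-loop test) ⇔ periodicity
theorem take_flatten_iff_periodB (w : List Char) (L k : Nat) (hL : 1 ≤ L) (hk : w.length ≤ k * L) :
    (w = (List.flatten (List.replicate k (w.take L))).take w.length) ↔ PeriodB w L := by
  by_cases hw0 : w.length = 0
  · have hwnil : w = [] := List.eq_nil_of_length_eq_zero hw0
    subst hwnil
    constructor
    · exact fun _ i hi => absurd hi (by simp)
    · intro _; simp
  · have hw : 0 < w.length := by omega
    have hk1 : 1 ≤ k := by
      rcases Nat.eq_zero_or_pos k with h0 | h1
      · subst h0; rw [zero_mul] at hk; omega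
      · exact h1
    have hu1 : 1 ≤ (w.take L).length := by rw [List.length_take]; omega
    have hbound : w.length ≤ k * (w.take L).length := by
      by_cases hLw : L ≤ w.length
      · have he : (w.take L).length = L := by rw [List.length_take]; omega
        rw [he]; exact hk
      · have he : (w.take L).length = w.length := by rw [List.length_take]; omega
        rw [he]
        calc w.length = 1 * w.length := (one_mul _).symm
        _ ≤ k * w.length := Nat.mul_le_mul_right _ hk1
    constructor
    · intro h i hi
      have hgd : ∀ j, j < w.length →
          w.getD j ' ' = (w.take L).getD (j % (w.take L).length) ' ' := by
        intro j hj
        conv_lhs => rw [h]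
        rw [getD_take_lt _ _ _ hj, getD_flatten_replicate _ _ _ hu1 (by omega)]
      have hueq : (w.take L).length = L := by rw [List.length_take]; omega
      rw [hgd i (by omega), hgd (i + L) hi, hueq, Nat.add_mod_right]
    · intro hp
      apply listExtGetD
      · rw [List.length_take, length_flatten_replicate]; omega
      · intro i hi
        rw [getD_take_lt _ _ _ hi, getD_flatten_replicate _ _ _ hu1 (by omega)]
        by_cases hLw : L ≤ w.length
        · have hueq : (w.take L).length = L := by rw [List.length_take]; omega
          rw [hueq, getD_take_lt _ _ _ (Nat.mod_lt _ (by omega))]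
          exact getD_mod_of_periodB w L hL hp i hi
        · have hwu : w.take L = w := List.take_of_length_le (by omega)
          rw [hwu, Nat.mod_eq_of_lt hi]

-- characterisation of Source B's inner while-loop
theorem bRun_go (s : List Char) (L : Nat) (hL : 1 ≤ L) :
    ∀ f t, f + t = s.length - L →
    (∀ i, i < t → s.getD (s.length - L - 1 - i) ' ' = s.getD (s.length - 1 - i) ' ') →
    t ≤ bRun s L f t ∧ bRun s L f t ≤ s.length - L ∧
    (∀ i, i < bRun s L f t → s.getD (s.length - L - 1 - i) ' ' = s.getD (s.length - 1 - i) ' ') ∧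
    (bRun s L f t = s.length - L ∨
      ¬ s.getD (s.length - L - 1 - bRun s L f t) ' ' = s.getD (s.length - 1 - bRun s L f t) ' ') := by
  intro f
  induction f with
  | zero =>
    intro t hft hmat
    simp only [bRun]
    exact ⟨le_refl _, by omega, hmat, Or.inl (by omega)⟩
  | succ f ih =>
    intro t hft hmat
    simp only [bRun]
    by_cases hc : s.getD (s.length - L - 1 - t) ' ' = s.getD (s.length - 1 - t) ' '
    · rw [if_pos (by simp only [beq_iff_eq]; exact hc)]
      obtain ⟨h1, h2, h3, h4⟩ := ih (t + 1) (by omega) (by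
        intro i hi
        by_cases hit : i < t
        · exact hmat i hit
        · have : i = t := by omega
          subst this; exact hc)
      exact ⟨by omega, h2, h3, h4⟩
    · rw [if_neg (by simp only [beq_iff_eq]; exact hc)]
      exact ⟨le_refl _, by omega, hmat, Or.inr hc⟩

-- the run determines exactly which suffixes are periodic
theorem per_iff_run_le (s : List Char) (L : Nat) (hL : 1 ≤ L) (hLn : L ≤ s.length) (a : Nat) :
    Per s L a ↔ s.length - L - bRun s L (s.length - L) 0 ≤ a := by
  obtain ⟨-, h2, h3, h4⟩ := bRun_go s L hL (s.length - L) 0 (by omega)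
    (fun i hi => absurd hi (by omega))
  constructor
  · intro hp
    by_contra hlt
    push_neg at hlt
    rcases h4 with h4 | h4
    · omega
    · refine h4 ?_
      have := hp (s.length - L - 1 - bRun s L (s.length - L) 0) (by omega) (by omega)
      rwa [show s.length - L - 1 - bRun s L (s.length - L) 0 + L
          = s.length - 1 - bRun s L (s.length - L) 0 by omega] at this
  · intro hge j haj hjL
    have hilt : s.length - L - 1 - j < bRun s L (s.length - L) 0 := by omega
    have := h3 (s.length - L - 1 - j) hilt
    rwa [show s.length - L - 1 - (s.length - L - 1 - j) = j by omega,
      show s.length - 1 - (s.length - L - 1 - j) = j + L by omega] at this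

-- Nat.findGreatest respects pointwise-equivalent predicates
theorem findGreatest_congr' (P Q : Nat → Prop) [DecidablePred P] [DecidablePred Q] :
    ∀ n, (∀ m, m ≤ n → (P m ↔ Q m)) → Nat.findGreatest P n = Nat.findGreatest Q n := by
  intro n
  induction n with
  | zero => intro _; rfl
  | succ n ih =>
    intro h
    rw [Nat.findGreatest_succ, Nat.findGreatest_succ, ih (fun m hm => h m (by omega))]
    by_cases hq : Q (n + 1)
    · rw [if_pos ((h (n + 1) (le_refl _)).mpr hq), if_pos hq]
    · rw [if_neg (fun hp => hq ((h (n + 1) (le_refl _)).mp hp)), if_neg hq]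

-- D_'s prefix condition at L is exactly SufPer s L (k*L)
theorem prefix_iff_sufPer (s : List Char) (k L : Nat) (hble : k * L ≤ s.length)
    (hLk : L ≤ k * L) :
    (s.drop (s.length - k * L + L) <+: s.drop (s.length - k * L)) ↔ SufPer s L (k * L) := by
  rw [List.prefix_iff_eq_take]
  unfold SufPer
  have hlen : (s.drop (s.length - k * L + L)).length = k * L - L := by
    rw [List.length_drop]; omega
  rw [hlen]

-- D_'s extension condition is periodicity of the one-longer suffix
theorem prefixExt_iff (s : List Char) (mm F : Nat) (hF : 1 ≤ F) :
    (s.drop (s.length - mm * F - 1 + F) <+: s.drop (s.length - mm * F - 1)) ↔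
      Per s F (s.length - mm * F - 1) := by
  rw [List.prefix_iff_eq_take]
  have hd : s.drop (s.length - mm * F - 1 + F) = (s.drop (s.length - mm * F - 1)).drop F := by
    rw [List.drop_drop]
  rw [per_iff_periodB, ← shift_iff_periodB _ _ hF, hd]
  have hlen : ((s.drop (s.length - mm * F - 1)).drop F).length =
      (s.drop (s.length - mm * F - 1)).length - F := by rw [List.length_drop]
  rw [hlen]

-- the run equals its lower bound (m-1)F exactly when the repeat is exactly m copies
theorem run_eq_iff (s : List Char) (mm F : Nat) (hmm : 1 ≤ mm) (hF : 1 ≤ F)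
    (hble : mm * F ≤ s.length) (hper : SufPer s F (mm * F)) :
    bRun s F (s.length - F) 0 = (mm - 1) * F ↔
      (s.length = mm * F ∨
        ¬ s.drop (s.length - mm * F - 1 + F) <+: s.drop (s.length - mm * F - 1)) := by
  have hmul : F ≤ mm * F := by
    calc F = 1 * F := (one_mul F).symm
    _ ≤ mm * F := Nat.mul_le_mul_right F hmm
  obtain ⟨-, h2, -, -⟩ := bRun_go s F hF (s.length - F) 0 (by omega)
    (fun i hi => absurd hi (by omega))
  have hperAll := per_iff_run_le s F hF (by omega)
  set R := bRun s F (s.length - F) 0 with hR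
  have hRge : (mm - 1) * F ≤ R := by
    have := (hperAll (s.length - mm * F)).mp
      ((sufPer_iff s F (mm * F) hF hmul hble).mp hper)
    have hsm : (mm - 1) * F = mm * F - F := by rw [Nat.sub_mul, one_mul]
    omega
  rw [prefixExt_iff s mm F hF, hperAll]
  have hsm : (mm - 1) * F = mm * F - F := by rw [Nat.sub_mul, one_mul]
  generalize hA : mm * F = A at *
  omega

-- A's first-loop test ⇔ periodicity of the last mm*L characters
theorem cond1_iff (s : List Char) (mm L : Nat) (hmm : 1 ≤ mm) (hL : 1 ≤ L)
    (hb : mm * L ≤ s.length) :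
    (aCond1 s (mm : Int) (L : Int) = true) ↔ Per s L (s.length - mm * L) := by
  unfold aCond1
  have hLm : L ≤ mm * L := by
    calc L = 1 * L := (one_mul L).symm
    _ ≤ mm * L := Nat.mul_le_mul_right L hmm
  have hc1 : -((mm : Int) * (L : Int)) = -((mm * L : Nat) : Int) := by push_cast; ring
  rw [hc1, PySem.List.slice_from_neg_natCast s (mm * L) (by omega),
    PySem.List.slice_from_neg_natCast s L (by omega)]
  simp only [pyMulChars, Int.toNat_natCast]
  rw [beq_iff_eq]
  have hdrop : s.drop (s.length - L) = (s.drop (s.length - mm * L)).drop ((mm - 1) * L) := by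
    rw [List.drop_drop]
    congr 1
    have h1 : (mm - 1) * L = mm * L - L := by rw [Nat.sub_mul, one_mul]
    omega
  rw [hdrop]
  have hwlen : (s.drop (s.length - mm * L)).length = mm * L := by
    rw [List.length_drop]; omega
  constructor
  · intro h
    rw [per_iff_periodB]
    refine periodB_of_flatten _ _ mm L hL ?_ h
    rw [List.length_drop, hwlen]
    have h1 : (mm - 1) * L = mm * L - L := by rw [Nat.sub_mul, one_mul]
    omega
  · intro h
    exact flatten_last_of_periodB _ L mm hL hmm hwlen ((per_iff_periodB s L _).mp h)

-- A's second-loop test ⇔ periodicity of the suffix from st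
theorem cond2_iff (s : List Char) (L st : Nat) (hL : 1 ≤ L) (hst : st + L ≤ s.length) :
    ((PySem.List.slice s (some (st : Int)) none ==
      PySem.List.slice
        (pyMulChars (PySem.List.slice s (some (st : Int)) (some ((st : Int) + (L : Int))))
          (PySem.Int.floordiv ((s.length : Int) - st) (L : Int) + 1))
        none (some ((s.length : Int) - st))) = true) ↔ Per s L st := by
  have hstn : st ≤ s.length := by omega
  rw [PySem.List.slice_from_natCast, PySem.List.slice_natCast_add]
  have he : (s.length : Int) - (st : Int) = ((s.length - st : Nat) : Int) := by omega
  rw [he, PySem.Int.floordiv_natCast, PySem.List.slice_to_natCast]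
  simp only [pyMulChars]
  have htn : ∀ q : Nat, ((q : Int) + 1).toNat = q + 1 := fun q => by omega
  rw [htn, beq_iff_eq]
  have hwl : s.length - st = (s.drop st).length := (List.length_drop ..).symm
  rw [hwl]
  have hkL : (s.drop st).length ≤ ((s.drop st).length / L + 1) * L := by
    rw [Nat.add_mul, one_mul]
    have h1 := Nat.div_add_mod (s.drop st).length L
    have h2 := Nat.mod_lt (s.drop st).length (show 0 < L by omega)
    revert h1 h2
    generalize (s.drop st).length / L = q
    generalize (s.drop st).length % L = r
    intro h1 h2
    rw [Nat.mul_comm q L]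
    omega
  rw [take_flatten_iff_periodB _ _ _ hL hkL, ← per_iff_periodB]

theorem aLoop1_eq (s : List Char) (mm : Nat) (hmm : 1 ≤ mm) :
    ∀ f, f ≤ s.length / mm →
    aLoop1 s (mm : Int) f =
      (if Nat.findGreatest (fun L => SufPer s L (mm * L)) f = 0 then none
       else some ((Nat.findGreatest (fun L => SufPer s L (mm * L)) f : Nat) : Int)) := by
  intro f
  induction f with
  | zero => intro _; simp [aLoop1]
  | succ f ih =>
    intro hf
    have hble : mm * (f + 1) ≤ s.length := by
      have h := (Nat.le_div_iff_mul_le (show 0 < mm by omega)).mp hf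
      rw [Nat.mul_comm] at h; exact h
    have hmul : f + 1 ≤ mm * (f + 1) := by
      calc f + 1 = 1 * (f + 1) := (one_mul _).symm
      _ ≤ mm * (f + 1) := Nat.mul_le_mul_right _ hmm
    have hiff : (aCond1 s (mm : Int) ((f + 1 : Nat) : Int) = true) ↔ SufPer s (f + 1) (mm * (f + 1)) := by
      rw [cond1_iff s mm (f + 1) hmm (by omega) hble,
        ← sufPer_iff s (f + 1) (mm * (f + 1)) (by omega) hmul hble]
    simp only [aLoop1]
    rw [Nat.findGreatest_succ]
    by_cases hP : SufPer s (f + 1) (mm * (f + 1))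
    · rw [if_pos (hiff.mpr hP), if_pos hP]
      simp
    · rw [if_neg (fun h => hP (hiff.mp h)), if_neg hP]
      exact ih (by omega)

theorem bLoop_eq (s : List Char) (mm : Nat) (hmm : 1 ≤ mm) :
    ∀ f, f ≤ s.length / mm →
    bLoop s mm f =
      (if Nat.findGreatest (fun L => SufPer s L (mm * L)) f = 0 then (-1, 0)
       else (((s.length : Int) - Nat.findGreatest (fun L => SufPer s L (mm * L)) f -
              bRun s (Nat.findGreatest (fun L => SufPer s L (mm * L)) f)
                (s.length - Nat.findGreatest (fun L => SufPer s L (mm * L)) f) 0),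
             ((Nat.findGreatest (fun L => SufPer s L (mm * L)) f : Nat) : Int))) := by
  intro f
  induction f with
  | zero => intro _; simp [bLoop]
  | succ f ih =>
    intro hf
    have hble : mm * (f + 1) ≤ s.length := by
      have h := (Nat.le_div_iff_mul_le (show 0 < mm by omega)).mp hf
      rw [Nat.mul_comm] at h; exact h
    have hmul : f + 1 ≤ mm * (f + 1) := by
      calc f + 1 = 1 * (f + 1) := (one_mul _).symm
      _ ≤ mm * (f + 1) := Nat.mul_le_mul_right _ hmm
    have hLn : f + 1 ≤ s.length := by omega
    obtain ⟨-, ht2, -, -⟩ := bRun_go s (f + 1) (by omega) (s.length - (f + 1)) 0 (by omega)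
      (fun i hi => absurd hi (by omega))
    have hiff : ((mm - 1) * (f + 1) ≤ bRun s (f + 1) (s.length - (f + 1)) 0) ↔
        SufPer s (f + 1) (mm * (f + 1)) := by
      rw [sufPer_iff s (f + 1) (mm * (f + 1)) (by omega) hmul hble,
        per_iff_run_le s (f + 1) (by omega) hLn (s.length - mm * (f + 1))]
      have hsm : (mm - 1) * (f + 1) = mm * (f + 1) - (f + 1) := by rw [Nat.sub_mul, one_mul]
      omega
    simp only [bLoop]
    rw [Nat.findGreatest_succ]
    by_cases hP : SufPer s (f + 1) (mm * (f + 1))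
    · rw [if_pos (hiff.mpr hP), if_pos hP, if_neg (by omega : ¬(f + 1 = 0))]
      simp only [Prod.mk.injEq]
      constructor <;> push_cast <;> ring
    · rw [if_neg (fun h => hP (hiff.mp h)), if_neg hP]
      exact ih (by omega)

theorem aLoop2_char (s : List Char) (L s0 : Nat) (hL : 1 ≤ L)
    (hper : ∀ st : Nat, st + L ≤ s.length → (Per s L st ↔ s0 ≤ st)) :
    ∀ b : Int, ∀ a : Int, 0 ≤ a → (∀ st : Int, a ≤ st → st < b → st.toNat + L ≤ s.length) →
    aLoop2 s (s.length : Int) (L : Int) (PySem.List.pyRange a b 1) =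
      (if max a (s0 : Int) < b then (max a (s0 : Int), (L : Int)) else (-1, 0)) := by
  intro b
  suffices H : ∀ d : Nat, ∀ a : Int, 0 ≤ a →
      (∀ st : Int, a ≤ st → st < b → st.toNat + L ≤ s.length) → (b - a).toNat = d →
      aLoop2 s (s.length : Int) (L : Int) (PySem.List.pyRange a b 1) =
        (if max a (s0 : Int) < b then (max a (s0 : Int), (L : Int)) else (-1, 0)) by
    exact fun a h0 hr => H (b - a).toNat a h0 hr rfl
  intro d
  induction d with
  | zero =>
    intro a h0a hrange hd
    have hba : b ≤ a := by omega
    rw [PySem.List.pyRange_one_eq_nil hba]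
    have hm := le_max_left a ((s0 : Nat) : Int)
    rw [if_neg (by omega)]
    rfl
  | succ d ih =>
    intro a h0a hrange hd
    have hab : a < b := by omega
    rw [PySem.List.pyRange_one_cons hab]
    have hstL : a.toNat + L ≤ s.length := hrange a (le_refl a) hab
    have hc := cond2_iff s L a.toNat hL hstL
    have ha : ((a.toNat : Nat) : Int) = a := Int.toNat_of_nonneg h0a
    rw [← ha]
    simp only [aLoop2]
    by_cases hP : Per s L a.toNat
    · rw [if_pos (hc.mpr hP)]
      have hs0a : s0 ≤ a.toNat := (hper a.toNat hstL).mp hP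
      rw [max_eq_left (show ((s0 : Nat) : Int) ≤ ((a.toNat : Nat) : Int) by omega)]
      rw [if_pos (show ((a.toNat : Nat) : Int) < b by omega)]
    · rw [if_neg (fun h => hP (hc.mp h))]
      have hs0a : a.toNat < s0 := by
        by_contra hcon
        exact hP ((hper a.toNat hstL).mpr (by omega))
      have hrec := ih (((a.toNat : Nat) : Int) + 1) (by omega)
        (fun st h1 h2 => hrange st (by omega) h2) (by omega)
      rw [hrec]
      have hm1 : max ((a.toNat : Nat) : Int) ((s0 : Nat) : Int) = ((s0 : Nat) : Int) :=
        max_eq_right (by omega)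
      have hm2 : max (((a.toNat : Nat) : Int) + 1) ((s0 : Nat) : Int) = ((s0 : Nat) : Int) :=
        max_eq_right (by omega)
      rw [hm1, hm2]

theorem floordiv_neg_nonpos (n : Nat) (m : Int) (hm : m < 0) :
    PySem.Int.floordiv (n : Int) m ≤ 0 := by
  rw [← PySem.Int.floordiv_neg_neg (n : Int) m]
  have h2 := (PySem.Int.floordiv_lt_iff_lt_mul (show (0 : Int) < -m by omega)).mpr
    (show -(n : Int) < 1 * (-m) by omega)
  omega

-- the main case analysis: values of both programs, and the difference region
theorem main_char (string : String) (m : Int) (hm0 : m ≠ 0) :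
    (¬ D_find_repeating_end string m →
      find_repeating_end string m = find_repeating_end_alt string m) ∧
    (D_find_repeating_end string m →
      find_repeating_end string m = (-1, 0) ∧ (find_repeating_end_alt string m).2 ≠ 0) := by
  by_cases hm1 : 1 ≤ m
  · obtain ⟨mm, hmeq⟩ : ∃ mm : Nat, ((mm : Nat) : Int) = m :=
      ⟨m.toNat, Int.toNat_of_nonneg (by omega)⟩
    subst hmeq
    have hmm : 1 ≤ mm := by omega
    have hfd' : (PySem.Int.floordiv ((string.toList.length : Nat) : Int) ((mm : Nat) : Int)).toNat
        = string.toList.length / mm := by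
      rw [PySem.Int.floordiv_natCast, Int.toNat_natCast]
    have hA1 := aLoop1_eq string.toList mm hmm (string.toList.length / mm) (le_refl _)
    have hB1 := bLoop_eq string.toList mm hmm (string.toList.length / mm) (le_refl _)
    set F := Nat.findGreatest (fun L => SufPer string.toList L (mm * L))
      (string.toList.length / mm) with hFdef
    have hFeq : Nat.findGreatest
        (fun L => string.toList.drop (string.toList.length - mm * L + L) <+:
          string.toList.drop (string.toList.length - mm * L)) (string.toList.length / mm) = F := by
      rw [hFdef]
      refine findGreatest_congr' _ _ _ (fun L hL => prefix_iff_sufPer string.toList mm L ?_ ?_)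
      · have h := (Nat.le_div_iff_mul_le (show 0 < mm by omega)).mp hL
        rw [Nat.mul_comm] at h; exact h
      · calc L = 1 * L := (one_mul L).symm
        _ ≤ mm * L := Nat.mul_le_mul_right L hmm
    have hDfe : D_find_repeating_end string ((mm : Nat) : Int) ↔
        (F ≠ 0 ∧ (string.toList.length = mm * F ∨
          ¬ string.toList.drop (string.toList.length - mm * F - 1 + F) <+:
            string.toList.drop (string.toList.length - mm * F - 1))) := by
      have h0 : ∀ G : Nat, Nat.findGreatest
          (fun L => string.toList.drop (string.toList.length - mm * L + L) <+:
            string.toList.drop (string.toList.length - mm * L)) (string.toList.length / mm) = G →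
          (D_find_repeating_end string ((mm : Nat) : Int) ↔
            (G ≠ 0 ∧ (string.toList.length = mm * G ∨
              ¬ string.toList.drop (string.toList.length - mm * G - 1 + G) <+:
                string.toList.drop (string.toList.length - mm * G - 1)))) := by
        intro G hG
        subst hG
        exact Iff.rfl
      exact h0 F hFeq
    have hBv0 : find_repeating_end_alt string ((mm : Nat) : Int)
        = bLoop string.toList mm (string.toList.length / mm) := by
      simp only [find_repeating_end_alt]
      rw [Int.toNat_natCast, hfd']
    by_cases hF0 : F = 0
    · have hAv : find_repeating_end string ((mm : Nat) : Int) = (-1, 0) := by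
        simp only [find_repeating_end]
        rw [hfd', hA1, if_pos hF0]
      have hBv : find_repeating_end_alt string ((mm : Nat) : Int) = (-1, 0) := by
        rw [hBv0, hB1, if_pos hF0]
      constructor
      · intro _; rw [hAv, hBv]
      · intro hD
        exact ((hDfe.mp hD).1 hF0).elim
    · have hF1 : 1 ≤ F := by omega
      have hFle : F ≤ string.toList.length / mm := by rw [hFdef]; exact Nat.findGreatest_le _
      have hble : mm * F ≤ string.toList.length := by
        have h := (Nat.le_div_iff_mul_le (show 0 < mm by omega)).mp hFle
        rw [Nat.mul_comm] at h; exact h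
      have hmul : F ≤ mm * F := by
        calc F = 1 * F := (one_mul _).symm
        _ ≤ mm * F := Nat.mul_le_mul_right _ hmm
      have hFn : F ≤ string.toList.length := by omega
      have hper : SufPer string.toList F (mm * F) := by
        have hpos : 0 < Nat.findGreatest (fun L => SufPer string.toList L (mm * L))
            (string.toList.length / mm) := by rw [← hFdef]; omega
        obtain ⟨k, hk0, hkn, hkP⟩ := Nat.findGreatest_pos.mp hpos
        have hPF := Nat.findGreatest_spec
          (P := fun L => SufPer string.toList L (mm * L)) hkn hkP
        rw [← hFdef] at hPF
        exact hPF
      obtain ⟨-, ht2, -, -⟩ := bRun_go string.toList F (by omega) (string.toList.length - F) 0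
        (by omega) (fun i hi => absurd hi (by omega))
      set R := bRun string.toList F (string.toList.length - F) 0 with hRdef
      have hperAll := per_iff_run_le string.toList F (by omega) hFn
      rw [← hRdef] at hperAll
      have hRge : (mm - 1) * F ≤ R := by
        have := (hperAll (string.toList.length - mm * F)).mp
          ((sufPer_iff string.toList F (mm * F) (by omega) hmul hble).mp hper)
        have hsm : (mm - 1) * F = mm * F - F := by rw [Nat.sub_mul, one_mul]
        omega
      have hcast : ((mm * F : Nat) : Int) = ((mm : Nat) : Int) * ((F : Nat) : Int) := by
        push_cast; ring
      have hbeq : (string.toList.length : Int) - ((mm : Nat) : Int) * ((F : Nat) : Int)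
          = ((string.toList.length - mm * F : Nat) : Int) := by
        rw [← hcast]; omega
      have hAv : find_repeating_end string ((mm : Nat) : Int)
          = aLoop2 string.toList (string.toList.length : Int) ((F : Nat) : Int)
              (PySem.List.pyRange 0 ((string.toList.length - mm * F : Nat) : Int) 1) := by
        simp only [find_repeating_end]
        rw [hfd', hA1, if_neg hF0]
        show aLoop2 string.toList (string.toList.length : Int) ((F : Nat) : Int)
            (PySem.List.pyRange 0
              ((string.toList.length : Int) - ((mm : Nat) : Int) * ((F : Nat) : Int)) 1) = _
        rw [hbeq]
      have hchar := aLoop2_char string.toList F (string.toList.length - F - R) (by omega)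
        (fun st _ => hperAll st) ((string.toList.length - mm * F : Nat) : Int) 0 (by omega)
        (by intro st h1 h2; omega)
      have hmax0 : max (0 : Int) ((string.toList.length - F - R : Nat) : Int)
          = ((string.toList.length - F - R : Nat) : Int) := max_eq_right (by omega)
      rw [hmax0] at hchar
      have hBv : find_repeating_end_alt string ((mm : Nat) : Int)
          = (((string.toList.length : Int) - F - R), ((F : Nat) : Int)) := by
        rw [hBv0, hB1, if_neg hF0]
      have hDiff : D_find_repeating_end string ((mm : Nat) : Int) ↔ R = (mm - 1) * F := by
        rw [hDfe, hRdef, run_eq_iff string.toList mm F hmm hF1 hble hper]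
        constructor
        · exact fun h => h.2
        · exact fun h => ⟨by omega, h⟩
      have hsm : (mm - 1) * F = mm * F - F := by rw [Nat.sub_mul, one_mul]
      have hcond : (((string.toList.length - F - R : Nat) : Int)
          < ((string.toList.length - mm * F : Nat) : Int)) ↔ (mm - 1) * F < R := by omega
      constructor
      · intro hnD
        have hRgt : (mm - 1) * F < R := by
          rcases Nat.lt_or_ge ((mm - 1) * F) R with h | h
          · exact h
          · exact absurd (hDiff.mpr (by omega)) hnD
        rw [hAv, hchar, hBv, if_pos (hcond.mpr hRgt)]
        have : ((string.toList.length - F - R : Nat) : Int)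
            = (string.toList.length : Int) - F - R := by omega
        rw [this]
      · intro hD
        have hRe : R = (mm - 1) * F := hDiff.mp hD
        constructor
        · rw [hAv, hchar, if_neg (fun h => by omega)]
        · rw [hBv]
          simp only
          omega
  · have hfd : (PySem.Int.floordiv ((string.toList.length : Nat) : Int) m).toNat = 0 := by
      have := floordiv_neg_nonpos string.toList.length m (by omega)
      omega
    constructor
    · intro _
      simp only [find_repeating_end, find_repeating_end_alt]
      rw [hfd]
      simp [aLoop1, bLoop]
    · intro hD
      have h1 : Nat.findGreatest
          (fun L => string.toList.drop (string.toList.length - m.toNat * L + L) <+: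
            string.toList.drop (string.toList.length - m.toNat * L))
          (string.toList.length / m.toNat) ≠ 0 := hD.1
      have hk : m.toNat = 0 := by omega
      rw [hk, Nat.div_zero] at h1
      exact (h1 rfl).elim

-- ===== VERDICT (by name: the statements are the Claim_ definitions above) =====
theorem find_repeating_end_spec : Claim_unchanged_find_repeating_end := by
  intro string m _ hpre hnD
  exact (main_char string m hpre).1 hnD

theorem find_repeating_end_changed : Claim_changed_find_repeating_end := by
  unfold Claim_changed_find_repeating_end; decide

theorem find_repeating_end_tight : Claim_exact_find_repeating_end := by
  intro string m _ hpre hD heq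
  obtain ⟨hA, hB⟩ := (main_char string m hpre).2 hD
  rw [← heq, hA] at hB
  exact hB rfl
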